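-- pv_equiv track=rewrite | github.com/knTkd/document-creater | creater.py | levels2bottoms
-- ===== SOURCE A (Python) =====
-- def levels2bottoms(indent_levels):
--     # インデントレベルのリストから局所的な底であるかどうかのBoolリストを返す
--     on_decrease = True
--     last_down_idx = 1
--     r = [False] * len(indent_levels)
--     levels = indent_levels + [-1] # 一番最後に強制的に上げることで未処理がないように
--     for i, (cur, pre) in enumerate(zip(levels[1:], levels[:-1]), 1):
--         if cur < pre and on_decrease:
--             on_decrease = False
--             # 最後に下がったところから今の地点までを全部Trueに
--             for j in range(last_down_idx, i):
--                 r[j] = True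
--         elif cur > pre:
--             on_decrease = True
--             last_down_idx = i
--     return r
-- ===== SOURCE B (Python) =====
-- def levels2bottoms(indent_levels):
--     # Two linear passes instead of an arm/disarm flag with an inner fill loop:
--     # da[j] = walking right from j over equal levels we hit a strict drop
--     #         (the virtual -1 after the end counts),
--     # rb[j] = walking left from j over equal levels we hit a strict rise
--     #         (the start of the list counts).
--     # An index is a local bottom marker iff j >= 1 and rb[j] and da[j].
--     da = []
--     nxt, nd = -1, False
--     for v in reversed(indent_levels):
--         d = nxt < v or (nxt == v and nd)
--         da.append(d)
--         nxt, nd = v, d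
--     da.reverse()
--     rb = []
--     prv, pr = None, True
--     for v in indent_levels:
--         b = pr if (prv is None or prv == v) else prv < v
--         rb.append(b)
--         prv, pr = v, b
--     return [i >= 1 and b and d for i, (b, d) in enumerate(zip(rb, da))]
-- ===== Notes on version B (the rewrite author's own statement) =====
-- stated objective: alternative
-- what changed: Replaces A's single stateful scan (arm/disarm flag, last-rise index and an inner fill loop writing past indices) by two independent linear passes computing per-index flags -- 'a strict drop lies ahead across equal levels' (backward pass, with the -1 sentinel) and 'a strict rise lies behind across equal levels' (forward pass) -- combined pointwise with index>=1.
import Mathlib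
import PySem

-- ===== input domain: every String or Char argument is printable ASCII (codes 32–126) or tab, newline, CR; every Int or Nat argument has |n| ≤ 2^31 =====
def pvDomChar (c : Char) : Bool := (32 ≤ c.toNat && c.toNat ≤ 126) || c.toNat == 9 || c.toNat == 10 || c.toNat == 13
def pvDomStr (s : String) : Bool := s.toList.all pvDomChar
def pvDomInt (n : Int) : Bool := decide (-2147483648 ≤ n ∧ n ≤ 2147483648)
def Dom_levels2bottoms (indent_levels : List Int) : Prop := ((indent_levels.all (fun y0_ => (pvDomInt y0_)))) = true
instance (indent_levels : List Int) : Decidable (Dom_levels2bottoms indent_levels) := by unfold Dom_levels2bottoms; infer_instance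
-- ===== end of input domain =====

-- B replaces A's stateful scan (flag + inner fill loop) by two independent linear passes
-- ("drop ahead" backward, "rise behind" forward) combined pointwise; same O(n) cost.

-- ===== PORT A =====
-- inner loop: for j in range(last_down_idx, i): r[j] = True   (j is always ≥ 0 here, so .toNat is exact)
def l2bFill (r : List Bool) (ld i : Int) : List Bool :=
  (PySem.List.pyRange ld i 1).foldl (fun r j => r.set j.toNat true) r

-- the main loop, recursion over the zipped (cur, pre) pairs, carrying enumerate's index i
def l2bLoop : List (Int × Int) → Int → Bool → Int → List Bool → List Bool
  | [], _, _, _, r => r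
  | (cur, pre) :: rest, i, od, ld, r =>
    if cur < pre ∧ od = true then
      l2bLoop rest (i + 1) false ld (l2bFill r ld i)
    else if pre < cur then
      l2bLoop rest (i + 1) true i r
    else
      l2bLoop rest (i + 1) od ld r

def levels2bottoms (indent_levels : List Int) : List Bool :=
  let r := List.replicate indent_levels.length false
  let levels := indent_levels ++ [-1]
  l2bLoop ((PySem.List.slice levels (some 1) none).zip (PySem.List.slice levels none (some (-1)))) 1 true 1 r

-- ===== PORT B =====
def levels2bottoms_alt (indent_levels : List Int) : List Bool :=
  let daSt := indent_levels.reverse.foldl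
    (fun (st : Int × Bool × List Bool) v =>
      let d := decide (st.1 < v) || (decide (st.1 = v) && st.2.1)
      (v, d, st.2.2 ++ [d]))
    ((-1 : Int), false, ([] : List Bool))
  let da := daSt.2.2.reverse
  let rbSt := indent_levels.foldl
    (fun (st : Option Int × Bool × List Bool) v =>
      let b := match st.1 with
        | none => st.2.1
        | some p => if p = v then st.2.1 else decide (p < v)
      (some v, b, st.2.2 ++ [b]))
    ((none : Option Int), true, ([] : List Bool))
  let rb := rbSt.2.2
  (PySem.List.enumerate (rb.zip da) 0).map (fun p => decide (1 ≤ p.1) && p.2.1 && p.2.2)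

-- ===== PRECONDITION & SPEC =====
def Spec_levels2bottoms (indent_levels : List Int) (out : List Bool) : Prop := out = levels2bottoms_alt indent_levels
instance (indent_levels : List Int) (out : List Bool) : Decidable (Spec_levels2bottoms indent_levels out) := by unfold Spec_levels2bottoms; infer_instance

-- ===== CLAIM (what is proved, stated in full; the proofs are below) =====
def Claim_equal_levels2bottoms : Prop := ∀ (indent_levels : List Int), Dom_levels2bottoms indent_levels → Spec_levels2bottoms indent_levels (levels2bottoms indent_levels)

-- ===== LEMMAS AND PROOFS =====

-- reference "drop ahead" flags, structural on the list (head uses the next element, -1 past the end)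
def daL : List Int → List Bool
  | [] => []
  | v :: rest =>
    (decide (rest.headD (-1) < v) || (decide (rest.headD (-1) = v) && (daL rest).headD false)) :: daL rest

-- reference "rise behind" flags: rbL prev prevFlag rest
def rbL : Int → Bool → List Int → List Bool
  | _, _, [] => []
  | p, b, v :: rest =>
    let b' := if p = v then b else decide (p < v)
    b' :: rbL v b' rest

def rbT : List Int → List Bool
  | [] => []
  | v :: rest => true :: rbL v true rest

def markB (xs : List Int) (j : Nat) : Bool :=
  decide (1 ≤ j) && (rbT xs).getD j false && (daL xs).getD j false

def markList (xs : List Int) : List Bool := (List.range xs.length).map (markB xs)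

theorem length_daL (xs : List Int) : (daL xs).length = xs.length := by
  induction xs with
  | nil => rfl
  | cons v rest ih => simp [daL, ih]

theorem length_rbL (p : Int) (b : Bool) (xs : List Int) : (rbL p b xs).length = xs.length := by
  induction xs generalizing p b with
  | nil => rfl
  | cons v rest ih => simp [rbL, ih]

theorem length_rbT (xs : List Int) : (rbT xs).length = xs.length := by
  cases xs with
  | nil => rfl
  | cons v rest => simp [rbT, length_rbL]

theorem foldDA (xs : List Int) :
    xs.reverse.foldl (fun (st : Int × Bool × List Bool) v =>
      let d := decide (st.1 < v) || (decide (st.1 = v) && st.2.1)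
      (v, d, st.2.2 ++ [d])) ((-1 : Int), false, ([] : List Bool))
    = (xs.headD (-1), (daL xs).headD false, (daL xs).reverse) := by
  induction xs with
  | nil => rfl
  | cons v rest ih =>
    rw [List.reverse_cons, List.foldl_append, ih]
    simp [daL]

theorem foldRB (xs : List Int) (p : Int) (b : Bool) (acc : List Bool) :
    (xs.foldl (fun (st : Option Int × Bool × List Bool) v =>
      let b := match st.1 with
        | none => st.2.1
        | some p => if p = v then st.2.1 else decide (p < v)
      (some v, b, st.2.2 ++ [b])) (some p, b, acc)).2.2 = acc ++ rbL p b xs := by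
  induction xs generalizing p b acc with
  | nil => simp [rbL]
  | cons v rest ih =>
    rw [List.foldl_cons]
    simp only []
    rw [ih]
    simp [rbL]

theorem alt_eq (xs : List Int) : levels2bottoms_alt xs =
    (PySem.List.enumerate ((rbT xs).zip (daL xs)) 0).map (fun p => decide (1 ≤ p.1) && p.2.1 && p.2.2) := by
  unfold levels2bottoms_alt
  simp only [foldDA, List.reverse_reverse]
  cases xs with
  | nil => rfl
  | cons v rest =>
    rw [List.foldl_cons]
    simp only []
    rw [foldRB]
    simp [rbT]

theorem alt_eq_markList (xs : List Int) : levels2bottoms_alt xs = markList xs := by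
  rw [alt_eq]
  apply List.ext_getElem
  · simp [markList, length_rbT, length_daL]
  · intro k h1 h2
    simp only [markList, List.getElem_map, List.getElem_range, PySem.List.getElem_enumerate,
      List.getElem_zip, markB]
    have hk : k < xs.length := by
      simpa [markList] using h2
    rw [List.getD_eq_getElem (rbT xs) _ (by rw [length_rbT]; exact hk),
        List.getD_eq_getElem (daL xs) _ (by rw [length_daL]; exact hk)]
    congr 2
    simp

-- S-lookup helper: (xs ++ [-1])[m]? = some (xs.getD m (-1)) for m ≤ xs.length
theorem sget (xs : List Int) (m : Nat) (hm : m ≤ xs.length) :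
    (xs ++ [-1])[m]? = some (xs.getD m (-1)) := by
  by_cases h : m < xs.length
  · rw [List.getElem?_append_left h, List.getElem?_eq_getElem h, List.getD_eq_getElem xs _ h]
  · have hme : m = xs.length := by omega
    subst hme
    rw [List.getElem?_append_right (le_refl _), List.getD_eq_default xs _ (le_refl _)]
    simp

theorem getD_default_eq (xs : List Int) (m : Nat) (hm : m < xs.length) (d d' : Int) :
    xs.getD m d = xs.getD m d' := by
  rw [List.getD_eq_getElem xs _ hm, List.getD_eq_getElem xs _ hm]

theorem rbT_zero (xs : List Int) (h : 0 < xs.length) : (rbT xs).getD 0 false = true := by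
  cases xs with
  | nil => simp at h
  | cons v rest => rfl

theorem rbL_rec (xs : List Int) (p : Int) (b : Bool) (j : Nat) (h : j < xs.length) :
    (rbL p b xs).getD j false =
      (let cur := xs.getD j 0;
       let pre := if j = 0 then p else xs.getD (j - 1) 0;
       let prb := if j = 0 then b else (rbL p b xs).getD (j - 1) false;
       if pre = cur then prb else decide (pre < cur)) := by
  induction xs generalizing p b j with
  | nil => simp at h
  | cons v rest ih =>
    cases j with
    | zero => simp [rbL]
    | succ j =>
      have hj : j < rest.length := by simpa using h
      have hstep : (rbL p b (v :: rest)).getD (j + 1) false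
          = (rbL v (if p = v then b else decide (p < v)) rest).getD j false := by
        simp [rbL]
      rw [hstep, ih v (if p = v then b else decide (p < v)) j hj]
      cases j with
      | zero =>
        have h0 : (rbL p b (v :: rest)).getD 0 false = (if p = v then b else decide (p < v)) := by
          simp [rbL]
        simp only [if_pos rfl]
        rw [← h0]
        simp [List.getD]
      | succ j2 =>
        have hne1 : j2 + 1 ≠ 0 := by omega
        have hne2 : j2 + 1 + 1 ≠ 0 := by omega
        simp only [if_neg hne1, if_neg hne2]
        have hgd : (rbL p b (v :: rest)).getD (j2 + 1 + 1 - 1) false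
            = (rbL v (if p = v then b else decide (p < v)) rest).getD (j2 + 1 - 1) false := by
          simp [rbL]
        have hx1 : rest.getD (j2 + 1) 0 = (v :: rest).getD (j2 + 1 + 1) 0 := by simp
        have hx2 : rest.getD (j2 + 1 - 1) 0 = (v :: rest).getD (j2 + 1 + 1 - 1) 0 := by simp
        rw [hgd, hx1, hx2]

theorem rbT_rec (xs : List Int) (j : Nat) (h : j + 1 < xs.length) :
    (rbT xs).getD (j + 1) false =
      if xs.getD j 0 = xs.getD (j + 1) 0 then (rbT xs).getD j false
      else decide (xs.getD j 0 < xs.getD (j + 1) 0) := by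
  cases xs with
  | nil => simp at h
  | cons v rest =>
    have hj : j < rest.length := by simpa using h
    have hstep : (rbT (v :: rest)).getD (j + 1) false = (rbL v true rest).getD j false := by
      simp [rbT]
    rw [hstep, rbL_rec rest v true j hj]
    cases j with
    | zero =>
      simp [rbT]
    | succ j2 =>
      have hne : j2 + 1 ≠ 0 := by omega
      simp only [if_neg hne]
      have hgd : (rbL v true rest).getD (j2 + 1 - 1) false = (rbT (v :: rest)).getD (j2 + 1) false := by
        simp [rbT]
    -- align indices
      have hx1 : rest.getD (j2 + 1) 0 = (v :: rest).getD (j2 + 1 + 1) 0 := by simp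
      have hx2 : rest.getD (j2 + 1 - 1) 0 = (v :: rest).getD (j2 + 1) 0 := by simp
      rw [hgd, hx1, hx2]

theorem da_rec (xs : List Int) (j : Nat) (h : j < xs.length) :
    (daL xs).getD j false =
      (decide (xs.getD (j + 1) (-1) < xs.getD j 0) ||
        (decide (xs.getD (j + 1) (-1) = xs.getD j 0) && (daL xs).getD (j + 1) false)) := by
  induction xs generalizing j with
  | nil => simp at h
  | cons v rest ih =>
    cases j with
    | zero =>
      cases rest with
      | nil => simp [daL]
      | cons w rest2 =>
        cases hda : daL (w :: rest2) with
        | nil =>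
          have := length_daL (w :: rest2)
          rw [hda] at this
          simp at this
        | cons b t => simp [daL]
    | succ j =>
      have hj : j < rest.length := by simpa using h
      have hstep : (daL (v :: rest)).getD (j + 1) false = (daL rest).getD j false := by
        simp [daL]
      have hstep2 : (daL (v :: rest)).getD (j + 1 + 1) false = (daL rest).getD (j + 1) false := by
        simp [daL]
      rw [hstep, hstep2, ih j hj]
      simp

theorem da_chain_aux (xs : List Int) (k : Nat) (hk : k < xs.length) :
    ∀ (d j : Nat), j ≤ k → k - j = d →
      (∀ m, j ≤ m → m < k → xs.getD m 0 = xs.getD (m + 1) 0) →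
      (daL xs).getD j false = (daL xs).getD k false := by
  intro d
  induction d with
  | zero =>
    intro j h1 h2 _
    have : j = k := by omega
    rw [this]
  | succ d ih =>
    intro j h1 h2 hch
    have hjk' : j < k := by omega
    have hj : j < xs.length := by omega
    have heq : xs.getD (j + 1) (-1) = xs.getD j 0 := by
      rw [getD_default_eq xs (j + 1) (by omega) (-1) 0, ← hch j (le_refl j) hjk']
    have hstep : (daL xs).getD j false = (daL xs).getD (j + 1) false := by
      rw [da_rec xs j hj, heq]
      simp
    rw [hstep]
    exact ih (j + 1) (by omega) (by omega) (fun m hm1 hm2 => hch m (by omega) hm2)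

theorem da_chain_eq (xs : List Int) (j k : Nat) (hjk : j ≤ k) (hk : k < xs.length)
    (hch : ∀ m, j ≤ m → m < k → xs.getD m 0 = xs.getD (m + 1) 0) :
    (daL xs).getD j false = (daL xs).getD k false :=
  da_chain_aux xs k hk (k - j) j hjk rfl hch

theorem foldl_set_length (l : List Int) (r : List Bool) :
    (l.foldl (fun r j => r.set j.toNat true) r).length = r.length := by
  induction l generalizing r with
  | nil => rfl
  | cons x t ih => rw [List.foldl_cons, ih, List.length_set]

theorem length_l2bFill (r : List Bool) (ld i : Int) : (l2bFill r ld i).length = r.length := by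
  unfold l2bFill
  exact foldl_set_length _ r

theorem getD_fill_aux (k : Nat) : ∀ (ldN iN : Nat) (r : List Bool), iN - ldN = k → iN ≤ r.length →
    ∀ j : Nat, (l2bFill r (ldN : Int) (iN : Int)).getD j false =
      if ldN ≤ j ∧ j < iN then true else r.getD j false := by
  induction k with
  | zero =>
    intro ldN iN r hk hi j
    unfold l2bFill
    have hle : (iN : Int) ≤ (ldN : Int) := by exact_mod_cast (by omega : iN ≤ ldN)
    rw [PySem.List.pyRange_one_eq_nil hle, List.foldl_nil, if_neg (by omega)]
  | succ k ih =>
    intro ldN iN r hk hi j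
    have hlt : (ldN : Int) < (iN : Int) := by exact_mod_cast (by omega : ldN < iN)
    unfold l2bFill
    rw [PySem.List.pyRange_one_cons hlt, List.foldl_cons]
    have ht : ((ldN : Int)).toNat = ldN := Int.toNat_natCast ldN
    have hcast : (ldN : Int) + 1 = ((ldN + 1 : Nat) : Int) := by push_cast; ring
    rw [ht, hcast]
    have hrec := ih (ldN + 1) iN (r.set ldN true) (by omega)
      (by rw [List.length_set]; exact hi) j
    unfold l2bFill at hrec
    rw [hrec]
    by_cases hj : ldN + 1 ≤ j ∧ j < iN
    · rw [if_pos hj, if_pos (by omega)]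
    · rw [if_neg hj]
      by_cases hj2 : ldN ≤ j ∧ j < iN
      · have hjl : j = ldN := by omega
        rw [if_pos hj2, hjl, List.getD_eq_getElem?_getD, List.getElem?_set,
          if_pos rfl, if_pos (by omega : ldN < r.length)]
        rfl
      · rw [if_neg hj2, List.getD_eq_getElem?_getD, List.getElem?_set,
          if_neg (by omega : ¬ ldN = j), ← List.getD_eq_getElem?_getD]

theorem getD_l2bFill (ldN iN : Nat) (r : List Bool) (hi : iN ≤ r.length) (j : Nat) :
    (l2bFill r (ldN : Int) (iN : Int)).getD j false =
      if ldN ≤ j ∧ j < iN then true else r.getD j false :=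
  getD_fill_aux (iN - ldN) ldN iN r rfl hi j



theorem zip_dropLast_eq (l : List Int) : (l.drop 1).zip l.dropLast = (l.drop 1).zip l := by
  induction l with
  | nil => rfl
  | cons a t ih =>
    cases t with
    | nil => rfl
    | cons b t2 =>
      show (b :: t2).zip ((a :: b :: t2).dropLast) = (b :: t2).zip (a :: b :: t2)
      rw [List.dropLast_cons₂]
      show (b, a) :: t2.zip ((b :: t2).dropLast) = (b, a) :: t2.zip (b :: t2)
      exact congrArg (fun z => (b, a) :: z) (by simpa using ih)

theorem loopA_main (xs : List Int) (T : List Int) :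
    ∀ (iN ldN : Nat) (od : Bool) (r : List Bool),
    T = (xs ++ [-1]).drop (iN - 1) → 1 ≤ iN → iN ≤ xs.length + 1 →
    r.length = xs.length →
    (∀ j : Nat, j < (cond od ldN iN) → j < xs.length → r.getD j false = markB xs j) →
    (∀ j : Nat, (cond od ldN iN) ≤ j → j < xs.length → r.getD j false = false) →
    (od = true → 1 ≤ ldN ∧ ldN ≤ iN ∧ (ldN = iN → iN = 1) ∧
      (∀ m : Nat, ldN ≤ m → m < iN → xs.getD m (-1) = xs.getD (iN - 1) (-1)) ∧
      (∀ j : Nat, ldN ≤ j → j < iN → j < xs.length → (rbT xs).getD j false = true)) →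
    (od = false → 2 ≤ iN ∧ (iN - 1 < xs.length → (rbT xs).getD (iN - 1) false = false)) →
    l2bLoop ((T.drop 1).zip T) (iN : Int) od (ldN : Int) r = markList xs := by
  induction T with
  | nil =>
    intro iN ldN od r hT h1 h2 hlen hpre hfalse hod hnod
    exfalso
    have hL : ((xs ++ [-1]).drop (iN - 1)).length = 0 := by rw [← hT]; rfl
    rw [List.length_drop, List.length_append] at hL
    simp at hL
    omega
  | cons p T' ih =>
    intro iN ldN od r hT h1 h2 hlen hpre hfalse hod hnod
    cases T' with
    | nil =>
      have hL : ((xs ++ [-1]).drop (iN - 1)).length = 1 := by rw [← hT]; rfl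
      rw [List.length_drop, List.length_append] at hL
      have hiN : iN = xs.length + 1 := by simp at hL; omega
      show l2bLoop [] (iN : Int) od (ldN : Int) r = markList xs
      rw [l2bLoop]
      apply List.ext_getElem
      · rw [hlen, markList, List.length_map, List.length_range]
      · intro k hk1 hk2
        have hkn : k < xs.length := by rwa [hlen] at hk1
        have hmk : (markList xs)[k] = markB xs k := by simp [markList]
        rw [hmk, ← List.getD_eq_getElem r false hk1]
        cases od with
        | false => exact hpre k (show k < iN by omega) hkn
        | true =>
          obtain ⟨hld1, hldi, hldeq, hchain, hrb⟩ := hod rfl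
          by_cases hkld : k < ldN
          · exact hpre k hkld hkn
          · rw [hfalse k (show ldN ≤ k by omega) hkn]
            have hsent : ∀ m : Nat, ldN ≤ m → m < iN → xs.getD m (-1) = -1 := by
              intro m hm1 hm2
              rw [hchain m hm1 hm2, hiN]
              simp
            have hklast : (daL xs).getD (xs.length - 1) false = false := by
              rw [da_rec xs (xs.length - 1) (by omega)]
              have e1 : xs.getD (xs.length - 1 + 1) (-1) = -1 :=
                List.getD_eq_default xs _ (by omega)
              have e2 : xs.getD (xs.length - 1) 0 = -1 := by
                rw [getD_default_eq xs _ (by omega) 0 (-1)]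
                exact hsent _ (by omega) (by omega)
              have e3 : (daL xs).getD (xs.length - 1 + 1) false = false :=
                List.getD_eq_default _ _ (by rw [length_daL]; omega)
              rw [e1, e2, e3]
              simp
            have hda : (daL xs).getD k false = false := by
              rw [da_chain_eq xs k (xs.length - 1) (by omega) (by omega) ?_, hklast]
              intro m hm1 hm2
              have q1 : xs.getD m 0 = -1 := by
                rw [getD_default_eq xs m (by omega) 0 (-1)]
                exact hsent m (by omega) (by omega)
              have q2 : xs.getD (m + 1) 0 = -1 := by
                rw [getD_default_eq xs (m + 1) (by omega) 0 (-1)]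
                exact hsent (m + 1) (by omega) (by omega)
              rw [q1, q2]
            rw [markB, hda]
            simp
    | cons c T2 =>
      have hL : ((xs ++ [-1]).drop (iN - 1)).length = T2.length + 2 := by rw [← hT]; rfl
      rw [List.length_drop, List.length_append] at hL
      have hin : iN ≤ xs.length := by simp at hL; omega
      have hp : xs.getD (iN - 1) (-1) = p := by
        have h0 : (xs ++ [-1])[(iN - 1) + 0]? = some p := by
          rw [← List.getElem?_drop, ← hT]; rfl
        rw [Nat.add_zero, sget xs (iN - 1) (by omega)] at h0
        exact Option.some.inj h0
      have hc : xs.getD iN (-1) = c := by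
        have h0 : (xs ++ [-1])[(iN - 1) + 1]? = some c := by
          rw [← List.getElem?_drop, ← hT]; rfl
        rw [show iN - 1 + 1 = iN by omega, sget xs iN (by omega)] at h0
        exact Option.some.inj h0
      have hT' : c :: T2 = (xs ++ [-1]).drop (iN + 1 - 1) := by
        have ht : (xs ++ [-1]).drop (iN - 1 + 1) = ((xs ++ [-1]).drop (iN - 1)).tail :=
          List.tail_drop.symm
        rw [show iN + 1 - 1 = iN - 1 + 1 by omega, ht, ← hT]
        rfl
      have hcast : ((iN : Int) + 1) = (((iN + 1 : Nat)) : Int) := by push_cast; ring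
      have hpd : xs.getD (iN - 1) 0 = p := by
        rw [getD_default_eq xs (iN - 1) (by omega) 0 (-1)]; exact hp
      show l2bLoop ((c, p) :: ((c :: T2).drop 1).zip (c :: T2)) (iN : Int) od (ldN : Int) r
          = markList xs
      rw [l2bLoop]
      cases od with
      | true =>
        obtain ⟨hld1, hldi, hldeq, hchain, hrb⟩ := hod rfl
        by_cases hcp : c < p
        · -- FIRE
          rw [if_pos ⟨hcp, rfl⟩, hcast]
          have hrbiN : iN < xs.length → (rbT xs).getD iN false = false := by
            intro hinlt
            have hcd : xs.getD iN 0 = c := by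
              rw [getD_default_eq xs iN hinlt 0 (-1)]; exact hc
            have hr := rbT_rec xs (iN - 1) (by omega)
            rw [show iN - 1 + 1 = iN by omega] at hr
            rw [hr, hpd, hcd, if_neg (by omega : ¬ p = c), decide_eq_false (by omega : ¬ p < c)]
          have hdatrue : ∀ j : Nat, ldN ≤ j → j < iN → (daL xs).getD j false = true := by
            intro j hj1 hj2
            have hda1 : (daL xs).getD (iN - 1) false = true := by
              rw [da_rec xs (iN - 1) (by omega), show iN - 1 + 1 = iN by omega, hc, hpd]
              simp [hcp]
            rw [da_chain_eq xs j (iN - 1) (by omega) (by omega) ?_, hda1]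
            intro m hm1 hm2
            rw [getD_default_eq xs m (by omega) 0 (-1), getD_default_eq xs (m + 1) (by omega) 0 (-1),
              hchain m (by omega) (by omega), hchain (m + 1) (by omega) (by omega)]
          apply ih (iN + 1) ldN false (l2bFill r (ldN : Int) (iN : Int)) hT' (by omega) (by omega)
            (by rw [length_l2bFill]; exact hlen)
          · intro j hj hjn
            rw [getD_l2bFill ldN iN r (by omega) j]
            by_cases hjc : ldN ≤ j ∧ j < iN
            · rw [if_pos hjc]
              symm
              rw [markB, hrb j hjc.1 hjc.2 hjn, hdatrue j hjc.1 hjc.2]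
              have h1j : 1 ≤ j := by omega
              simp [h1j]
            · rw [if_neg hjc]
              by_cases hjld : j < ldN
              · exact hpre j hjld hjn
              · have hje : j = iN := by simp at hj; omega
                rw [hfalse j (show ldN ≤ j by omega) hjn, hje, markB, hrbiN (by omega)]
                simp
          · intro j hj hjn
            simp at hj
            rw [getD_l2bFill ldN iN r (by omega) j, if_neg (by omega)]
            exact hfalse j (show ldN ≤ j by omega) hjn
          · intro h; simp at h
          · intro _
            refine ⟨by omega, ?_⟩
            intro hlt
            rw [show iN + 1 - 1 = iN by omega] at hlt ⊢
            exact hrbiN hlt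
        · rw [if_neg (fun hh => hcp hh.1)]
          by_cases hup : p < c
          · -- REARM
            rw [if_pos hup, hcast]
            have hdafalse : ∀ j : Nat, ldN ≤ j → j < iN → (daL xs).getD j false = false := by
              intro j hj1 hj2
              have hda1 : (daL xs).getD (iN - 1) false = false := by
                rw [da_rec xs (iN - 1) (by omega), show iN - 1 + 1 = iN by omega, hc, hpd,
                  decide_eq_false hcp, decide_eq_false (by omega : ¬ c = p)]
                simp
              rw [da_chain_eq xs j (iN - 1) (by omega) (by omega) ?_, hda1]
              intro m hm1 hm2
              rw [getD_default_eq xs m (by omega) 0 (-1), getD_default_eq xs (m + 1) (by omega) 0 (-1),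
                hchain m (by omega) (by omega), hchain (m + 1) (by omega) (by omega)]
            apply ih (iN + 1) iN true r hT' (by omega) (by omega) hlen
            · intro j hj hjn
              simp at hj
              by_cases hjld : j < ldN
              · exact hpre j hjld hjn
              · rw [hfalse j (show ldN ≤ j by omega) hjn, markB, hdafalse j (by omega) hj]
                simp
            · intro j hj hjn
              simp at hj
              exact hfalse j (show ldN ≤ j by omega) hjn
            · intro _
              refine ⟨by omega, by omega, by omega, ?_, ?_⟩
              · intro m hm1 hm2
                rw [show m = iN by omega, show iN + 1 - 1 = iN by omega]
              · intro j hj1 hj2 hjn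
                have hje : j = iN := by omega
                have hcd : xs.getD iN 0 = c := by
                  rw [getD_default_eq xs iN (by omega) 0 (-1)]; exact hc
                have hr := rbT_rec xs (iN - 1) (by omega)
                rw [show iN - 1 + 1 = iN by omega] at hr
                rw [hje, hr, hpd, hcd, if_neg (by omega : ¬ p = c), decide_eq_true hup]
            · intro h; simp at h
          · -- PASS (c = p)
            rw [if_neg hup, hcast]
            have hce : c = p := by omega
            apply ih (iN + 1) ldN true r hT' (by omega) (by omega) hlen hpre hfalse
            · intro _
              refine ⟨hld1, by omega, by omega, ?_, ?_⟩
              · intro m hm1 hm2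
                rw [show iN + 1 - 1 = iN by omega]
                by_cases hme : m = iN
                · rw [hme]
                · rw [hchain m hm1 (by omega), hp, hc, hce]
              · intro j hj1 hj2 hjn
                by_cases hje : j = iN
                · have hcd : xs.getD iN 0 = c := by
                    rw [getD_default_eq xs iN (by omega) 0 (-1)]; exact hc
                  have hr := rbT_rec xs (iN - 1) (by omega)
                  rw [show iN - 1 + 1 = iN by omega] at hr
                  rw [hje, hr, hpd, hcd, if_pos (by omega : p = c)]
                  by_cases hli : ldN ≤ iN - 1
                  · exact hrb (iN - 1) hli (by omega) (by omega)
                  · have hi1 : iN = 1 := hldeq (by omega)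
                    rw [show iN - 1 = 0 by omega]
                    exact rbT_zero xs (by omega)
                · exact hrb j hj1 (by omega) hjn
            · intro h; simp at h
      | false =>
        obtain ⟨hi2, hrbprev⟩ := hnod rfl
        rw [if_neg (by simp)]
        by_cases hup : p < c
        · -- REARM from od = false
          rw [if_pos hup, hcast]
          apply ih (iN + 1) iN true r hT' (by omega) (by omega) hlen
          · intro j hj hjn
            simp at hj
            exact hpre j (show j < iN by omega) hjn
          · intro j hj hjn
            simp at hj
            exact hfalse j (show iN ≤ j by omega) hjn
          · intro _
            refine ⟨by omega, by omega, by omega, ?_, ?_⟩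
            · intro m hm1 hm2
              rw [show m = iN by omega, show iN + 1 - 1 = iN by omega]
            · intro j hj1 hj2 hjn
              have hje : j = iN := by omega
              have hcd : xs.getD iN 0 = c := by
                rw [getD_default_eq xs iN (by omega) 0 (-1)]; exact hc
              have hr := rbT_rec xs (iN - 1) (by omega)
              rw [show iN - 1 + 1 = iN by omega] at hr
              rw [hje, hr, hpd, hcd, if_neg (by omega : ¬ p = c), decide_eq_true hup]
          · intro h; simp at h
        · -- PASS from od = false (c ≤ p)
          rw [if_neg hup, hcast]
          have hrbiNf : iN < xs.length → (rbT xs).getD iN false = false := by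
            intro hinlt
            have hcd : xs.getD iN 0 = c := by
              rw [getD_default_eq xs iN hinlt 0 (-1)]; exact hc
            have hr := rbT_rec xs (iN - 1) (by omega)
            rw [show iN - 1 + 1 = iN by omega] at hr
            rw [hr, hpd, hcd]
            by_cases hpc : p = c
            · rw [if_pos hpc]
              exact hrbprev (by omega)
            · rw [if_neg hpc]
              exact decide_eq_false hup
          apply ih (iN + 1) ldN false r hT' (by omega) (by omega) hlen
          · intro j hj hjn
            simp at hj
            by_cases hji : j < iN
            · exact hpre j (show j < iN from hji) hjn
            · have hje : j = iN := by omega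
              rw [hfalse j (show iN ≤ j by omega) hjn, hje, markB, hrbiNf (by omega)]
              simp
          · intro j hj hjn
            simp at hj
            exact hfalse j (show iN ≤ j by omega) hjn
          · intro h; simp at h
          · intro _
            refine ⟨by omega, ?_⟩
            intro hlt
            rw [show iN + 1 - 1 = iN by omega] at hlt ⊢
            exact hrbiNf hlt

theorem a_eq_markList (xs : List Int) : levels2bottoms xs = markList xs := by
  show l2bLoop ((PySem.List.slice (xs ++ [-1]) (some 1) none).zip
      (PySem.List.slice (xs ++ [-1]) none (some (-1)))) 1 true 1
      (List.replicate xs.length false) = markList xs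
  rw [PySem.List.slice_from _ (by norm_num : (0:Int) ≤ 1), PySem.List.slice_to_neg_one]
  have h1 : ((1 : Int)).toNat = 1 := rfl
  rw [h1, zip_dropLast_eq]
  have h := loopA_main xs (xs ++ [-1]) 1 1 true (List.replicate xs.length false)
    (by simp) (le_refl 1) (by omega) (by simp)
    ?_ ?_ ?_ ?_
  · exact_mod_cast h
  · intro j hj hjn
    simp at hj
    have hj0 : j = 0 := by omega
    subst hj0
    rw [List.getD_eq_getElem?_getD, List.getElem?_replicate, if_pos hjn, markB]
    simp
  · intro j _ hjn
    rw [List.getD_eq_getElem?_getD, List.getElem?_replicate, if_pos hjn]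
    rfl
  · intro _
    refine ⟨le_refl 1, le_refl 1, fun _ => rfl, ?_, ?_⟩
    · intro m hm1 hm2; exact absurd hm2 (by omega)
    · intro j hj1 hj2 hjn; exact absurd hj2 (by omega)
  · intro h; simp at h

-- ===== VERDICT (by name: the statement is the Claim_ definition above) =====
theorem levels2bottoms_spec : Claim_equal_levels2bottoms := by
  intro xs _
  unfold Spec_levels2bottoms
  rw [a_eq_markList, alt_eq_markList]
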